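-- pv_equiv track=rewrite | github.com/Victor-Gabriel-Barbosa/ED2 | HashHanny/mainenlacamento.py | funcao_hash
-- ===== SOURCE A (Python) =====
-- def funcao_hash(nomecidade, tamtabela):
--     GRUPO_TAMANHO = 3
--     grupos = []
--
--     for i in range(0, len(nomecidade), GRUPO_TAMANHO):
--         valor = 0
--         fim = min(i + GRUPO_TAMANHO, len(nomecidade))
--
--
--         for j in range(i, fim):
--             valor = valor * 10 + (ord(nomecidade[j]) % 10)
--
--         grupos.append(valor)
--
--
--     for i in range(1, len(grupos) - 1):
--         original = grupos[i]
--         invertido = 0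
--         while original > 0:
--             invertido = invertido * 10 + original % 10
--             original //= 10
--         grupos[i] = invertido
--
--
--     return sum(grupos) % tamtabela
-- ===== SOURCE B (Python) =====
-- def _valor(chunk):
--     v = 0
--     for c in chunk:
--         v = v * 10 + ord(c) % 10
--     return v
--
-- def _valor_invertido(chunk):
--     # reversed numeric value built straight from the characters:
--     # drop the chunk's leading zero digits, then fold right-to-left
--     ds = [ord(c) % 10 for c in chunk]
--     while ds and ds[0] == 0:
--         ds.pop(0)
--     v = 0
--     for d in reversed(ds):
--         v = v * 10 + d
--     return v
--
-- def funcao_hash(nomecidade, tamtabela):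
--     total = 0
--     s = nomecidade
--     if s:
--         total += _valor(s[:3])
--         s = s[3:]
--         while len(s) > 3:
--             total += _valor_invertido(s[:3])
--             s = s[3:]
--         if s:
--             total += _valor(s)
--     return total % tamtabela
-- ===== Notes on version B (the rewrite author's own statement) =====
-- stated objective: alternative
-- what changed: B consumes the string itself by repeated slicing (first chunk, a while loop over the >3-char suffixes, then the trailing chunk) instead of A's index-range passes over an intermediate groups list, and it has no numeric digit-reversal loop at all: a middle chunk's reversed value is built directly from its characters right-to-left after dropping the leading zero digits; Pre_ only excludes tamtabela = 0, where both raise ZeroDivisionError.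
import Mathlib
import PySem

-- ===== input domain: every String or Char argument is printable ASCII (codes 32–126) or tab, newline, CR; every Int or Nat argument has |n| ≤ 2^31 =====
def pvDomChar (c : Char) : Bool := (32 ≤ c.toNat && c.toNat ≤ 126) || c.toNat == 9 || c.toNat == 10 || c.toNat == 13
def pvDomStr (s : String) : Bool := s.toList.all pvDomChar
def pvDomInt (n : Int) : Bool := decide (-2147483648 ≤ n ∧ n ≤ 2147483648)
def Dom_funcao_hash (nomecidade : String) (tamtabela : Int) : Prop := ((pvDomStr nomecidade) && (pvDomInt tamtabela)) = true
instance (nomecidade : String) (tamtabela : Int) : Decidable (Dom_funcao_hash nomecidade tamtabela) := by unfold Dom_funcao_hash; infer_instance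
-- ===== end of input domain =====

-- B consumes the string by repeated slicing (first chunk, a while loop over >3-char
-- suffixes, then the trailing chunk) and has no numeric digit-reversal loop at all:
-- a middle chunk's reversed value is built directly from its characters, right-to-left
-- after dropping the leading zero digits (alternative decomposition, not faster).

-- ===== PORT A =====
-- digit-reversal while-loop 'while original > 0: invertido = invertido*10 + original%10; original //= 10'
def pvRevDigits (invertido original : Int) : Int :=
  if 0 < original then
    pvRevDigits (invertido * 10 + PySem.Int.mod original 10) (PySem.Int.floordiv original 10)
  else invertido
termination_by original.toNat
decreasing_by
  simp only [PySem.Int.floordiv_eq_ediv_of_pos (by norm_num : (0:Int) < 10)]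
  omega

def funcao_hash (nomecidade : String) (tamtabela : Int) : Int :=
  let cs := nomecidade.toList
  let grupos : List Int :=
    (PySem.List.pyRange 0 (PySem.Str.len nomecidade) 3).foldl (fun grupos i =>
      let fim := min (i + 3) (PySem.Str.len nomecidade)
      -- nomecidade[j] is always in range here, so the total pyGetD form is exact
      let valor := (PySem.List.pyRange i fim 1).foldl
        (fun valor j => valor * 10 + PySem.Int.mod ((PySem.List.pyGetD cs j ' ').toNat : Int) 10) 0
      grupos ++ [valor]) []
  let grupos :=
    (PySem.List.pyRange 1 ((grupos.length : Int) - 1) 1).foldl (fun grupos i =>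
      -- grupos[i] read and write: i is always in range here, so pyGetD/pySetD are exact
      let original := PySem.List.pyGetD grupos i 0
      let invertido := pvRevDigits 0 original
      PySem.List.pySetD grupos i invertido) grupos
  PySem.Int.mod grupos.sum tamtabela

-- ===== PORT B =====
-- helper _valor: positional digit value of a chunk
def pvValor (chunk : List Char) : Int :=
  chunk.foldl (fun v c => v * 10 + PySem.Int.mod (c.toNat : Int) 10) 0

-- helper _valor_invertido: 'while ds and ds[0]==0: ds.pop(0)' is ported as dropWhile
-- (exact: it removes precisely the leading zeros), then 'for d in reversed(ds)' folds the reverse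
def pvValorInvertido (chunk : List Char) : Int :=
  let ds := (chunk.map (fun c => PySem.Int.mod (c.toNat : Int) 10)).dropWhile (fun d => d == 0)
  ds.reverse.foldl (fun v d => v * 10 + d) 0

-- 'while len(s) > 3: total += _valor_invertido(s[:3]); s = s[3:]'
def pvWhileMiddle (s : List Char) (total : Int) : List Char × Int :=
  if 3 < s.length then pvWhileMiddle (s.drop 3) (total + pvValorInvertido (s.take 3))
  else (s, total)
termination_by s.length
decreasing_by simp only [List.length_drop]; omega

def funcao_hash_alt (nomecidade : String) (tamtabela : Int) : Int :=
  let s := nomecidade.toList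
  let total : Int := 0
  let total :=
    if s ≠ [] then
      let total := total + pvValor (s.take 3)
      let s := s.drop 3
      let p := pvWhileMiddle s total
      let s := p.1
      let total := p.2
      if s ≠ [] then total + pvValor s else total
    else total
  PySem.Int.mod total tamtabela

-- ===== PRECONDITION & SPEC =====
-- Pre_ excludes exactly tamtabela = 0, where A raises ZeroDivisionError (B raises there too).
def Pre_funcao_hash (nomecidade : String) (tamtabela : Int) : Prop := tamtabela ≠ 0
instance (nomecidade : String) (tamtabela : Int) : Decidable (Pre_funcao_hash nomecidade tamtabela) := by unfold Pre_funcao_hash; infer_instance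
def pvWitness_funcao_hash : String × Int := ("Curitiba", 11)

def Spec_funcao_hash (nomecidade : String) (tamtabela : Int) (out : Int) : Prop := out = funcao_hash_alt nomecidade tamtabela
instance (nomecidade : String) (tamtabela : Int) (out : Int) : Decidable (Spec_funcao_hash nomecidade tamtabela out) := by unfold Spec_funcao_hash; infer_instance

-- ===== CLAIM (what is proved, stated in full; the proofs are below) =====
def Claim_equal_funcao_hash : Prop := ∀ (nomecidade : String) (tamtabela : Int), Dom_funcao_hash nomecidade tamtabela → Pre_funcao_hash nomecidade tamtabela → Spec_funcao_hash nomecidade tamtabela (funcao_hash nomecidade tamtabela)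

-- ===== LEMMAS AND PROOFS =====

-- the value of the k-th group of 3 characters
def pvVal (cs : List Char) (k : Nat) : Int :=
  (List.take 3 (List.drop (3 * k) cs)).foldl (fun v c => v * 10 + PySem.Int.mod (c.toNat : Int) 10) 0

-- the groups list with digits reversed at indices 1 ≤ k < t
def pvMixed (cs : List Char) (N t : Nat) : List Int :=
  (List.range N).map (fun k => if 1 ≤ k ∧ k < t then pvRevDigits 0 (pvVal cs k) else pvVal cs k)

-- the k-th entry of the final groups list (t = N-1)
def pvEntry (cs : List Char) (N k : Nat) : Int :=
  if 1 ≤ k ∧ k < N - 1 then pvRevDigits 0 (pvVal cs k) else pvVal cs k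

-- an index loop over xs[a:b] is a fold of A's digit step over the slice
lemma pv_foldl_range_getD (xs : List Char) :
    ∀ (m : Nat) (a : Int) (init : Int), 0 ≤ a → a + m ≤ xs.length →
    (PySem.List.pyRange a (a + m) 1).foldl
      (fun valor j => valor * 10 + PySem.Int.mod (((PySem.List.pyGetD xs j ' ').toNat : Int)) 10) init
      = (List.take m (List.drop a.toNat xs)).foldl
          (fun v c => v * 10 + PySem.Int.mod ((c.toNat : Int)) 10) init := by
  intro m
  induction m with
  | zero =>
    intro a init _ _
    rw [Nat.cast_zero, add_zero, PySem.List.pyRange_one_eq_nil le_rfl]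
    simp
  | succ m ih =>
    intro a init ha hb
    have hlt : a < a + ((m + 1 : Nat) : Int) := by push_cast; omega
    rw [PySem.List.pyRange_one_cons hlt, List.foldl_cons]
    have hidx : a.toNat < xs.length := by omega
    have hget : PySem.List.pyGetD xs a ' ' = xs[a.toNat] :=
      PySem.List.pyGetD_eq_getElem xs ' ' ha (by omega)
    have hdrop : List.drop a.toNat xs = xs[a.toNat] :: List.drop (a.toNat + 1) xs :=
      List.drop_eq_getElem_cons hidx
    have h2 : ((a + 1 : Int)).toNat = a.toNat + 1 := by omega
    rw [hget, hdrop]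
    simp only [List.take_succ_cons, List.foldl_cons]
    have := ih (a + 1) (init * 10 + PySem.Int.mod ((xs[a.toNat].toNat : Int)) 10)
      (by omega) (by push_cast at hb ⊢; omega)
    rw [h2] at this
    rw [show a + ((m + 1 : Nat) : Int) = (a + 1) + ((m : Nat) : Int) by push_cast; ring]
    exact this

lemma pv_N_eq (len : Nat) :
    (if (0:Int) < (len : Int) then (((len : Int) - 0 + 3 - 1) / 3).toNat else 0) = (len + 2) / 3 := by
  split_ifs with h
  · omega
  · omega

-- after the first loop, grupos is the plain groups list
lemma pv_first_loop (s : String) :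
    (PySem.List.pyRange 0 (PySem.Str.len s) 3).foldl (fun grupos i =>
      let fim := min (i + 3) (PySem.Str.len s)
      let valor := (PySem.List.pyRange i fim 1).foldl
        (fun valor j => valor * 10 + PySem.Int.mod ((PySem.List.pyGetD s.toList j ' ').toNat : Int) 10) 0
      grupos ++ [valor]) []
      = pvMixed s.toList ((s.toList.length + 2) / 3) 0 := by
  rw [PySem.List.foldl_append_singleton_eq_map]
  rw [PySem.List.pyRange_of_pos 0 (PySem.Str.len s) (by norm_num : (0:Int) < 3)]
  rw [PySem.Str.len_eq, pv_N_eq, List.map_map]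
  unfold pvMixed
  apply List.map_congr_left
  intro k hk
  rw [List.mem_range] at hk
  simp only [Function.comp_apply]
  rw [if_neg (by omega)]
  set len := s.toList.length with hlen
  have hk3 : 3 * k < len := by omega
  have hmin : min (0 + 3 * (k : Int) + 3) ((len : Int))
      = (0 + 3 * (k : Int)) + (min 3 (len - 3 * k) : Nat) := by
    push_cast; omega
  rw [hmin, pv_foldl_range_getD s.toList (min 3 (len - 3 * k)) (0 + 3 * (k : Int)) 0
      (by positivity) (by rw [← hlen]; push_cast; omega)]
  unfold pvVal
  have ht : (0 + 3 * (k : Int)).toNat = 3 * k := by omega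
  rw [ht]
  congr 1
  have hdl : (List.drop (3 * k) s.toList).length = len - 3 * k := by
    rw [List.length_drop, ← hlen]
  rw [List.take_eq_take_iff, hdl]
  omega

-- the second loop reverses the digits of entries 1 … t-1
lemma pv_second_loop (cs : List Char) (N : Nat) :
    ∀ (t : Nat), t ≤ N →
    (PySem.List.pyRange 1 (t : Int) 1).foldl (fun grupos i =>
      let original := PySem.List.pyGetD grupos i 0
      let invertido := pvRevDigits 0 original
      PySem.List.pySetD grupos i invertido) (pvMixed cs N 0)
      = pvMixed cs N t := by
  intro t
  induction t with
  | zero =>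
    intro _
    rw [Nat.cast_zero, PySem.List.pyRange_one_eq_nil (by norm_num : (0:Int) ≤ 1), List.foldl_nil]
  | succ t ih =>
    intro ht
    by_cases h1 : t = 0
    · subst h1
      rw [show ((1:Nat) : Int) = 1 by norm_num,
        PySem.List.pyRange_one_eq_nil (by norm_num : (1:Int) ≤ 1), List.foldl_nil]
      unfold pvMixed
      apply List.map_congr_left
      intro k _
      congr 1
      simp only [eq_iff_iff]
      omega
    · have ht' : (1:Int) ≤ (t : Int) := by omega
      rw [show ((t + 1 : Nat) : Int) = (t : Int) + 1 by push_cast; ring,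
        PySem.List.pyRange_one_succ_right ht', List.foldl_append, ih (by omega), List.foldl_cons,
        List.foldl_nil]
      simp only []
      have htN : t < N := by omega
      have hget : PySem.List.pyGetD (pvMixed cs N t) (t : Int) 0 = pvVal cs t := by
        rw [PySem.List.pyGetD_natCast]
        unfold pvMixed
        rw [List.getD_eq_getElem?_getD, List.getElem?_map, List.getElem?_range htN]
        simp only [Option.map_some, Option.getD_some]
        rw [if_neg (by omega : ¬ (1 ≤ t ∧ t < t))]
      rw [hget, PySem.List.pySetD_natCast]
      unfold pvMixed
      apply List.ext_getElem (by simp)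
      intro i hi _
      rw [List.getElem_set]
      simp only [List.getElem_map, List.getElem_range]
      simp only [List.length_set, List.length_map, List.length_range] at hi
      by_cases hit : t = i
      · subst hit
        rw [if_pos rfl, if_pos (by omega)]
      · rw [if_neg hit]
        congr 1
        simp only [eq_iff_iff]
        omega

-- A's result in terms of pvMixed
lemma pv_A_eq (s : String) (tam : Int) :
    funcao_hash s tam
      = PySem.Int.mod (pvMixed s.toList ((s.toList.length + 2) / 3) (((s.toList.length + 2) / 3) - 1)).sum tam := by
  unfold funcao_hash
  simp only []
  rw [pv_first_loop s]
  set N := (s.toList.length + 2) / 3 with hN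
  have hlen : (pvMixed s.toList N 0).length = N := by
    unfold pvMixed; simp
  rw [hlen]
  by_cases hN0 : N = 0
  · rw [hN0]
    rw [PySem.List.pyRange_one_eq_nil (by norm_num : ((0:Nat):Int) - 1 ≤ 1), List.foldl_nil]
  · have : ((N : Nat) : Int) - 1 = ((N - 1 : Nat) : Int) := by omega
    rw [this, pv_second_loop s.toList N (N - 1) (by omega)]

-- pvMixed at t = N-1 is the map of pvEntry
lemma pv_mixed_entry (cs : List Char) (N : Nat) :
    pvMixed cs N (N - 1) = (List.range N).map (pvEntry cs N) := rfl

-- ---- B-side lemmas: the character-built reversed value equals A's numeric reversal ----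

-- horner value of a digit list is nonnegative
lemma pv_horner_nonneg (ds : List Int) (h : ∀ d ∈ ds, 0 ≤ d) :
    ∀ acc : Int, 0 ≤ acc → 0 ≤ ds.foldl (fun v d => v * 10 + d) acc := by
  induction ds with
  | nil => intro acc hacc; simpa using hacc
  | cons d ds ih =>
    intro acc hacc
    rw [List.foldl_cons]
    exact ih (fun x hx => h x (List.mem_cons_of_mem _ hx))
      _ (by have := h d List.mem_cons_self; positivity)

-- a digit list with horner value 0 is all zeros
lemma pv_horner_zero (ds : List Int) (h : ∀ d ∈ ds, 0 ≤ d ∧ d < 10)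
    (h0 : ds.foldl (fun v d => v * 10 + d) 0 = 0) : ∀ d ∈ ds, d = 0 := by
  induction ds using List.reverseRecOn with
  | nil => simp
  | append_singleton ds d ih =>
    rw [List.foldl_append, List.foldl_cons, List.foldl_nil] at h0
    have hh : 0 ≤ ds.foldl (fun v d => v * 10 + d) 0 :=
      pv_horner_nonneg ds (fun x hx => (h x (List.mem_append_left _ hx)).1) 0 le_rfl
    have hd := h d (List.mem_append_right _ List.mem_cons_self)
    have hds0 : ds.foldl (fun v d => v * 10 + d) 0 = 0 := by omega
    have hd0 : d = 0 := by omega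
    intro x hx
    rcases List.mem_append.1 hx with hx | hx
    · exact ih (fun y hy => h y (List.mem_append_left _ hy)) hds0 x hx
    · simp at hx; omega

-- an all-zero digit list has horner value 0
lemma pv_horner_all_zero (ds : List Int) (h : ∀ d ∈ ds, d = 0) :
    ds.foldl (fun v d => v * 10 + d) 0 = 0 := by
  induction ds with
  | nil => simp
  | cons d ds ih =>
    rw [List.foldl_cons, h d List.mem_cons_self, show (0:Int) * 10 + 0 = 0 by ring]
    exact ih (fun x hx => h x (List.mem_cons_of_mem _ hx))

-- A's digit-reversal of a horner value = fold over the reverse of the trimmed digit list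
lemma pv_rev_horner (ds : List Int) (h : ∀ d ∈ ds, 0 ≤ d ∧ d < 10) :
    ∀ acc : Int,
    pvRevDigits acc (ds.foldl (fun v d => v * 10 + d) 0)
      = ((ds.dropWhile (fun d => d == 0)).reverse).foldl (fun v d => v * 10 + d) acc := by
  induction ds using List.reverseRecOn with
  | nil =>
    intro acc
    rw [List.foldl_nil, pvRevDigits, if_neg (by norm_num)]
    simp
  | append_singleton ds d ih =>
    intro acc
    have hds : ∀ x ∈ ds, 0 ≤ x ∧ x < 10 := fun x hx => h x (List.mem_append_left _ hx)
    have hd := h d (List.mem_append_right _ List.mem_cons_self)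
    have hh : 0 ≤ ds.foldl (fun v d => v * 10 + d) 0 :=
      pv_horner_nonneg ds (fun x hx => (hds x hx).1) 0 le_rfl
    rw [List.foldl_append, List.foldl_cons, List.foldl_nil]
    set hv := ds.foldl (fun v d => v * 10 + d) 0 with hhv
    by_cases hpos : 0 < hv * 10 + d
    · rw [pvRevDigits, if_pos hpos]
      have hmod : PySem.Int.mod (hv * 10 + d) 10 = d := by
        rw [PySem.Int.mod_eq_emod_of_pos (by norm_num)]
        omega
      have hdiv : PySem.Int.floordiv (hv * 10 + d) 10 = hv := by
        rw [PySem.Int.floordiv_eq_ediv_of_pos (by norm_num)]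
        omega
      rw [hmod, hdiv, ih hds (acc * 10 + d)]
      have hsplit : (ds ++ [d]).dropWhile (fun d => d == 0)
          = ds.dropWhile (fun d => d == 0) ++ [d] := by
        by_cases hnil : ds.dropWhile (fun d => d == 0) = []
        · have hall : ∀ x ∈ ds, x = 0 := by
            intro x hx
            have := List.dropWhile_eq_nil_iff.1 hnil x hx
            simpa using this
          have hv0 : hv = 0 := by
            rw [hhv]
            exact pv_horner_all_zero ds hall
          have hd0 : d ≠ 0 := by omega
          rw [List.dropWhile_append, hnil]
          simp [hd0]
        · rw [List.dropWhile_append]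
          simp [hnil]
      rw [hsplit, List.reverse_append, List.reverse_singleton, List.singleton_append,
        List.foldl_cons]
    · -- hv*10 + d ≤ 0 with hv ≥ 0, d ≥ 0: both are zero, all digits are zero
      have hv0 : hv = 0 := by omega
      have hd0 : d = 0 := by omega
      rw [show hv * 10 + d = 0 by omega, pvRevDigits, if_neg (by norm_num)]
      have hall : ∀ x ∈ ds ++ [d], x = 0 := by
        have := pv_horner_zero ds hds (by rw [← hhv]; exact hv0)
        intro x hx
        rcases List.mem_append.1 hx with hx | hx
        · exact this x hx
        · simp at hx; omega
      have : (ds ++ [d]).dropWhile (fun d => d == 0) = [] := by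
        apply List.dropWhile_eq_nil_iff.2
        intro x hx
        simp [hall x hx]
      rw [this]
      simp

-- digits produced from characters are in [0, 10)
lemma pv_dig_range (c : Char) : 0 ≤ PySem.Int.mod ((c.toNat : Int)) 10 ∧ PySem.Int.mod ((c.toNat : Int)) 10 < 10 :=
  ⟨PySem.Int.mod_nonneg _ (by norm_num), PySem.Int.mod_lt _ (by norm_num)⟩

-- B's _valor_invertido = A's numeric digit reversal of the chunk's value
lemma pv_invertido_eq (chunk : List Char) :
    pvValorInvertido chunk = pvRevDigits 0 (pvValor chunk) := by
  unfold pvValorInvertido pvValor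
  have hmap : (chunk.map (fun c => PySem.Int.mod ((c.toNat : Int)) 10)).foldl
      (fun v d => v * 10 + d) 0
      = chunk.foldl (fun v c => v * 10 + PySem.Int.mod ((c.toNat : Int)) 10) 0 :=
    List.foldl_map
  rw [← hmap]
  rw [pv_rev_horner (chunk.map (fun c => PySem.Int.mod ((c.toNat : Int)) 10))
      (by intro d hd; rw [List.mem_map] at hd; obtain ⟨c, _, rfl⟩ := hd; exact pv_dig_range c) 0]

-- finishing step of B after the while loop
def pvFinish (p : List Char × Int) : Int := if p.1 ≠ [] then p.2 + pvValor p.1 else p.2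

-- the while loop plus the final chunk computes the tail of the mixed sum
lemma pv_tail (cs : List Char) :
    ∀ (g k : Nat) (total : Int), 1 ≤ k → k + g = (cs.length + 2) / 3 → cs.drop (3 * k) ≠ [] →
    pvFinish (pvWhileMiddle (cs.drop (3 * k)) total)
      = total + ((List.range g).map (fun j => pvEntry cs ((cs.length + 2) / 3) (k + j))).sum := by
  intro g
  induction g with
  | zero =>
    intro k total hk hkg hne
    exfalso
    have h3k : 3 * k < cs.length := by
      by_contra hc
      exact hne (List.drop_eq_nil_of_le (by omega))
    omega
  | succ g ih =>
    intro k total hk hkg hne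
    have h3k : 3 * k < cs.length := by
      by_contra hc
      exact hne (List.drop_eq_nil_of_le (by omega))
    have hlen : (cs.drop (3 * k)).length = cs.length - 3 * k := List.length_drop ..
    by_cases hbig : 3 < (cs.drop (3 * k)).length
    · -- middle chunk: one more iteration of the while loop
      have hg : 1 ≤ g := by omega
      rw [pvWhileMiddle, if_pos hbig]
      rw [List.drop_drop, show (3 * k + 3) = 3 * (k + 1) by ring] at *
      rw [ih (k + 1) (total + pvValorInvertido ((cs.drop (3 * k)).take 3)) (by omega) (by omega)
        (by intro hc; rw [List.drop_eq_nil_iff] at hc; omega)]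
      have hchunk : (cs.drop (3 * k)).take 3 = List.take 3 (List.drop (3 * k) cs) := rfl
      rw [hchunk, pv_invertido_eq]
      have hEk : pvEntry cs ((cs.length + 2) / 3) k
          = pvRevDigits 0 (pvVal cs k) := by
        unfold pvEntry
        rw [if_pos (by constructor <;> omega)]
      have hvv : pvVal cs k
          = pvValor (List.take 3 (List.drop (3 * k) cs)) := rfl
      rw [List.range_succ_eq_map, List.map_cons, List.map_map, List.sum_cons]
      rw [show (k + 0) = k by omega, hEk, hvv]
      have hfun : ((fun j => pvEntry cs ((cs.length + 2) / 3) (k + j)) ∘ (fun i => i + 1))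
          = fun j => pvEntry cs ((cs.length + 2) / 3) (k + 1 + j) := by
        funext j
        simp only [Function.comp_apply]
        congr 1
        omega
      rw [hfun]
      ring
    · -- last chunk: the while loop stops, the trailing 'if s:' adds the final value
      have hg0 : g = 0 := by omega
      subst hg0
      rw [pvWhileMiddle, if_neg hbig]
      unfold pvFinish
      rw [if_pos hne]
      have hEk : pvEntry cs ((cs.length + 2) / 3) k = pvVal cs k := by
        unfold pvEntry
        rw [if_neg (by omega)]
      have htake : (cs.drop (3 * k)).take 3 = cs.drop (3 * k) :=
        List.take_of_length_le (by omega)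
      have hvv : pvValor (cs.drop (3 * k)) = pvVal cs k := by
        unfold pvVal pvValor
        rw [htake]
      simp only [Nat.zero_add, List.range_one, List.map_cons, List.map_nil,
        List.sum_cons, List.sum_nil, add_zero, hEk, hvv]

-- B's result in terms of pvMixed
lemma pv_B_eq (s : String) (tam : Int) :
    funcao_hash_alt s tam
      = PySem.Int.mod (pvMixed s.toList ((s.toList.length + 2) / 3) (((s.toList.length + 2) / 3) - 1)).sum tam := by
  unfold funcao_hash_alt
  simp only []
  set cs := s.toList with hcs
  set N := (cs.length + 2) / 3 with hN
  rw [pv_mixed_entry]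
  by_cases hnil : cs = []
  · rw [if_neg (by simp [hnil])]
    have : N = 0 := by rw [hN, hnil]; rfl
    rw [this]
    simp
  · rw [if_pos hnil]
    have hpos : 0 < cs.length := List.length_pos_iff.2 hnil
    have hN1 : 1 ≤ N := by omega
    have hE0 : pvValor (cs.take 3) = pvEntry cs N 0 := by
      unfold pvEntry
      rw [if_neg (by omega)]
      rfl
    by_cases hrest : cs.drop 3 = []
    · -- a single group: the while loop and the trailing if are vacuous
      have hle : cs.length ≤ 3 := by
        by_contra hc
        rw [List.drop_eq_nil_iff] at hrest
        omega
      have hNone : N = 1 := by omega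
      show PySem.Int.mod (pvFinish (pvWhileMiddle (cs.drop 3) (0 + pvValor (cs.take 3)))) tam = _
      rw [hrest, pvWhileMiddle, if_neg (by simp)]
      unfold pvFinish
      rw [if_neg (by simp)]
      rw [hNone] at hE0 ⊢
      simp only [List.range_one, List.map_cons, List.map_nil, List.sum_cons, List.sum_nil,
        add_zero, zero_add, hE0]
    · have h31 : (3 : Nat) * 1 = 3 := by norm_num
      have htail := pv_tail cs (N - 1) 1 (0 + pvValor (cs.take 3)) le_rfl (by omega)
        (by rw [h31]; exact hrest)
      rw [h31] at htail
      show PySem.Int.mod (pvFinish (pvWhileMiddle (cs.drop 3) (0 + pvValor (cs.take 3)))) tam = _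
      rw [htail]
      rw [show N = (N - 1) + 1 by omega, List.range_succ_eq_map, List.map_cons, List.map_map,
        List.sum_cons]
      have hfun : ((fun k => pvEntry cs ((N - 1) + 1) k) ∘ (fun i => i + 1))
          = fun j => pvEntry cs ((cs.length + 2) / 3) (1 + j) := by
        funext j
        simp only [Function.comp_apply]
        congr 1 <;> omega
      rw [hfun]
      have h0 : pvEntry cs ((N - 1) + 1) 0 = pvEntry cs N 0 := by
        congr 1
        omega
      rw [h0, hE0]
      rw [show N - 1 + 1 - 1 = N - 1 by omega, zero_add]

-- ===== VERDICT (by name: the statement is the Claim_ definition above) =====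
theorem funcao_hash_spec : Claim_equal_funcao_hash := by
  intro s tam _ _
  unfold Spec_funcao_hash
  rw [pv_A_eq, pv_B_eq]
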